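-- pv_equiv track=rewrite | github.com/sunbcy/huawei_od_algorithm | 8 最长的指定瑕疵度的元音子串.py | findLongestVowelSubstring
-- ===== SOURCE A (Python) =====
-- vowels = set(['a', 'e', 'i', 'o', 'u', 'A', 'E', 'I', 'O', 'U'])
--
-- def findLongestVowelSubstring(flaw: int, s:str) -> int:
--     vowelIdxs = [i for i in range(len(s)) if s[i] in vowels]
--     left, right = 0, 0
--     lengths = []
--     while right < len(vowelIdxs):
--         lengthDiff = vowelIdxs[right] - vowelIdxs[left] - (right - left)
--         if lengthDiff > flaw:
--             left += 1
--         else: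
--             if lengthDiff == flaw:
--                 lengths.append(vowelIdxs[right] - vowelIdxs[left] + 1)
--             right += 1
--     if not lengths:
--         return 0
--     return max(lengths)
-- ===== SOURCE B (Python) =====
-- vowels = set(['a', 'e', 'i', 'o', 'u', 'A', 'E', 'I', 'O', 'U'])
--
-- def findLongestVowelSubstring(flaw: int, s: str) -> int:
--     # prefix-count hashmap: key j = vowelIdxs[j] - j = number of non-vowels before that vowel
--     vowelIdxs = [i for i in range(len(s)) if s[i] in vowels]
--     first = {}
--     best = 0
--     for j, v in enumerate(vowelIdxs):
--         key = v - j
--         if key not in first: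
--             first[key] = v
--         start = first.get(key - flaw)
--         if start is not None:
--             best = max(best, v - start + 1)
--     return best
-- ===== Notes on version B (the rewrite author's own statement) =====
-- stated objective: alternative
-- what changed: Replaces A's two-pointer sliding window over the vowel-index list (collecting window lengths and taking max at the end) by a single pass that maps each prefix non-vowel-count key = vowelIdxs[j]-j to its first vowel position in a dict and looks up key-flaw, tracking a running maximum.
import Mathlib
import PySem

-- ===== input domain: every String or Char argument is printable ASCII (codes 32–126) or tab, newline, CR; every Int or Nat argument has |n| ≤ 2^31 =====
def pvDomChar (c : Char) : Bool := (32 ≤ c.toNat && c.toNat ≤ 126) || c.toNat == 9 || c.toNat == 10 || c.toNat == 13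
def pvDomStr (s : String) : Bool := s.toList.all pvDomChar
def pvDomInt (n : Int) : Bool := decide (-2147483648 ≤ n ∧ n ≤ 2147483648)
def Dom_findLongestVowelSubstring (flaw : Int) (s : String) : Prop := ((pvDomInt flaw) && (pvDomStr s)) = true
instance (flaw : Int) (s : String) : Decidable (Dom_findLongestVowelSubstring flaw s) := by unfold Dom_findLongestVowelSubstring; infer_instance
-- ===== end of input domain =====

-- B replaces A's two-pointer sliding window over the vowel-index list by a first-occurrence
-- hashmap keyed on the prefix count vowelIdxs[j]-j with a running maximum (objective: alternative).


-- ===== PORT A =====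
def pvVowels : PySem.Set Char :=
  PySem.Set.ofList ['a', 'e', 'i', 'o', 'u', 'A', 'E', 'I', 'O', 'U']

def pvVowelIdxs (s : String) : List Int :=
  (PySem.List.pyRange 0 (PySem.Str.len s) 1).filter (fun i =>
    match PySem.Str.pyGet? s i with
    | some c => PySem.Set.contains pvVowels c
    | none => false)

-- A's while-loop, structurally recursive on a fuel bound ≥ its loop measure
-- (a totality guard only); `none` = Python's IndexError at vowelIdxs[left] (excluded by Pre_)
def goA (flaw : Int) (v : List Int) (fuel : Nat) (left right : Nat) (lengths : List Int) :
    Option (List Int) :=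
  match fuel with
  | 0 => none   -- never reached: the caller supplies fuel > the loop measure
  | fuel + 1 =>
    if hr : right < v.length then
      match PySem.List.pyGet? v (left : Int) with
      | none => none
      | some vl =>
        let vr := v[right]
        let lengthDiff := vr - vl - ((right : Int) - (left : Int))
        if lengthDiff > flaw then
          goA flaw v fuel (left + 1) right lengths
        else if lengthDiff = flaw then
          goA flaw v fuel left (right + 1) (lengths ++ [vr - vl + 1])
        else
          goA flaw v fuel left (right + 1) lengths
    else some lengths

def findLongestVowelSubstring (flaw : Int) (s : String) : Int :=
  let vowelIdxs := pvVowelIdxs s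
  match goA flaw vowelIdxs (2 * vowelIdxs.length + 2) 0 0 [] with
  | none => 0
  | some lengths =>
    if lengths = [] then 0
    else (PySem.List.max? lengths (fun x => x)).getD 0

-- ===== PORT B =====
def findLongestVowelSubstring_alt (flaw : Int) (s : String) : Int :=
  let vowelIdxs := pvVowelIdxs s
  let res := (PySem.List.enumerate vowelIdxs).foldl
    (fun (st : PySem.Dict Int Int × Int) jv =>
      let key := jv.2 - jv.1
      let first := if st.1.contains key then st.1 else st.1.insert key jv.2
      match first.get? (key - flaw) with
      | some start => (first, max st.2 (jv.2 - start + 1))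
      | none => (first, st.2))
    (PySem.Dict.empty, 0)
  res.2

-- ===== PRECONDITION & SPEC =====
-- Pre_ excludes exactly the inputs on which A raises IndexError (negative flaw on a
-- string containing a vowel: the left pointer runs past the vowel list); on every
-- input where A returns, Pre_ holds.
def Pre_findLongestVowelSubstring (flaw : Int) (s : String) : Prop :=
  0 ≤ flaw ∨ ∀ c ∈ s.toList, c ∉ (['a', 'e', 'i', 'o', 'u', 'A', 'E', 'I', 'O', 'U'] : List Char)
instance (flaw : Int) (s : String) : Decidable (Pre_findLongestVowelSubstring flaw s) := by
  unfold Pre_findLongestVowelSubstring; infer_instance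

def pvWitness_findLongestVowelSubstring : Int × String := (1, "aba")

def Spec_findLongestVowelSubstring (flaw : Int) (s : String) (out : Int) : Prop :=
  out = findLongestVowelSubstring_alt flaw s
instance (flaw : Int) (s : String) (out : Int) :
    Decidable (Spec_findLongestVowelSubstring flaw s out) := by
  unfold Spec_findLongestVowelSubstring; infer_instance

-- ===== CLAIM (what is proved, stated in full; the proofs are below) =====
def Claim_equal_findLongestVowelSubstring : Prop :=
  ∀ (flaw : Int) (s : String), Dom_findLongestVowelSubstring flaw s →
    Pre_findLongestVowelSubstring flaw s →
    Spec_findLongestVowelSubstring flaw s (findLongestVowelSubstring flaw s)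

-- ===== LEMMAS AND PROOFS =====
def pvKeys (v : List Int) : List Int :=
  (List.range v.length).map (fun i => v.getD i 0 - i)

def pvCand (flaw : Int) (v : List Int) (j : Nat) : Option Int :=
  ((pvKeys v).findIdx? (fun x => x == v.getD j 0 - j - flaw)).map
    (fun i => v.getD j 0 - v.getD i 0 + 1)

def pvLens (flaw : Int) (v : List Int) : List Int :=
  (List.range v.length).filterMap (pvCand flaw v)

lemma pvVowelIdxs_pairwise (s : String) : (pvVowelIdxs s).Pairwise (· < ·) :=
  (PySem.List.pairwise_lt_pyRange_one 0 (PySem.Str.len s)).filter _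

lemma pvChain (v : List Int) (hv : v.Pairwise (· < ·)) {i j : Nat} (hij : i ≤ j)
    (hj : j < v.length) : v.getD i 0 + ((j : Int) - i) ≤ v.getD j 0 := by
  induction j with
  | zero =>
    interval_cases i
    simp
  | succ j ih =>
    rcases Nat.eq_or_lt_of_le hij with rfl | hlt
    · simp
    · have hij' : i ≤ j := by omega
      have hj' : j < v.length := by omega
      have h1 := ih hij' hj'
      have h2 : v[j] < v[j + 1] :=
        List.pairwise_iff_getElem.mp hv j (j+1) hj' hj (by omega)
      rw [List.getD_eq_getElem v 0 hj'] at h1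
      rw [List.getD_eq_getElem v 0 hj]
      rw [List.getD_eq_getElem v 0 (by omega : i < v.length)] at h1 ⊢
      push_cast
      omega

lemma pvKeyMono (v : List Int) (hv : v.Pairwise (· < ·)) {i j : Nat} (hij : i ≤ j)
    (hj : j < v.length) : v.getD i 0 - i ≤ v.getD j 0 - j := by
  have := pvChain v hv hij hj
  omega

lemma pvKeys_getElem (v : List Int) {i : Nat} (h : i < (pvKeys v).length) :
    (pvKeys v)[i] = v.getD i 0 - i := by
  simp [pvKeys]

lemma pvKeys_length (v : List Int) : (pvKeys v).length = v.length := by simp [pvKeys]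

lemma pvCand_idx_le (flaw : Int) (v : List Int) (hv : v.Pairwise (· < ·)) (hf : 0 ≤ flaw)
    {j i : Nat} (hj : j < v.length)
    (h : (pvKeys v).findIdx? (fun x => x == v.getD j 0 - j - flaw) = some i) : i ≤ j := by
  obtain ⟨hi, hpi, hmin⟩ := List.findIdx?_eq_some_iff_getElem.mp h
  rw [pvKeys_getElem v hi] at hpi
  have hi' : i < v.length := by simpa [pvKeys_length] using hi
  by_contra hgt
  have hji : j ≤ i := by omega
  have hmono := pvKeyMono v hv hji hi'
  have heq : v.getD i 0 - i = v.getD j 0 - j - flaw := by simpa using hpi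
  have hf0 : flaw = 0 := by omega
  have := hmin j (by omega)
  rw [pvKeys_getElem v (by simpa [pvKeys_length] using hj)] at this
  simp [hf0] at this

lemma pvLens_pos (flaw : Int) (v : List Int) (hv : v.Pairwise (· < ·)) (hf : 0 ≤ flaw) :
    ∀ c ∈ pvLens flaw v, 1 ≤ c := by
  intro c hc
  simp only [pvLens, List.mem_filterMap, List.mem_range] at hc
  obtain ⟨j, hj, hcand⟩ := hc
  simp only [pvCand, Option.map_eq_some_iff] at hcand
  obtain ⟨i, hfind, rfl⟩ := hcand
  have hij := pvCand_idx_le flaw v hv hf hj hfind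
  have := pvChain v hv hij hj
  omega

-- the first match for target K_j - flaw lies in the first j+1 keys

lemma findIdx?_take_eq (flaw : Int) (v : List Int) (hv : v.Pairwise (· < ·)) (hf : 0 ≤ flaw)
    {j : Nat} (hj : j < v.length) :
    ((pvKeys v).take (j+1)).findIdx? (fun x => x == v.getD j 0 - j - flaw) =
      (pvKeys v).findIdx? (fun x => x == v.getD j 0 - j - flaw) := by
  have hsplit : pvKeys v = (pvKeys v).take (j+1) ++ (pvKeys v).drop (j+1) :=
    (List.take_append_drop _ _).symm
  rcases hp : ((pvKeys v).take (j+1)).findIdx? (fun x => x == v.getD j 0 - j - flaw) with _ | i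
  · rcases hg : (pvKeys v).findIdx? (fun x => x == v.getD j 0 - j - flaw) with _ | i
    · rfl
    · exfalso
      have hij := pvCand_idx_le flaw v hv hf hj hg
      obtain ⟨hi, hpi, hmin⟩ := List.findIdx?_eq_some_iff_getElem.mp hg
      have := List.findIdx?_eq_none_iff.mp hp ((pvKeys v)[i])
      have hmem : (pvKeys v)[i] ∈ (pvKeys v).take (j+1) := by
        have hlt : i < ((pvKeys v).take (j+1)).length := by
          simp [pvKeys_length]; omega
        have := List.getElem_take (xs := pvKeys v) (h := hlt)
        rw [← this]
        exact List.getElem_mem hlt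
      have hfalse := this hmem
      rw [hpi] at hfalse
      simp at hfalse
  · conv_rhs => rw [hsplit]
    rw [List.findIdx?_append, hp]
    rfl

lemma foldB_eq (flaw : Int) (v : List Int) (hv : v.Pairwise (· < ·)) (hf : 0 ≤ flaw) :
    ∀ m, m ≤ v.length →
      ∃ d : PySem.Dict Int Int,
        ((PySem.List.enumerate v).take m).foldl
          (fun (st : PySem.Dict Int Int × Int) jv =>
            let key := jv.2 - jv.1
            let first := if st.1.contains key then st.1 else st.1.insert key jv.2
            match first.get? (key - flaw) with
            | some start => (first, max st.2 (jv.2 - start + 1))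
            | none => (first, st.2))
          (PySem.Dict.empty, 0)
        = (d, ((List.range m).filterMap (pvCand flaw v)).foldl max 0) ∧
        (∀ t : Int, d.get? t =
          (((pvKeys v).take m).findIdx? (fun x => x == t)).map (fun i => v.getD i 0)) := by
  intro m
  induction m with
  | zero =>
    intro _
    exact ⟨PySem.Dict.empty, by simp, by intro t; simp [PySem.Dict.get?_empty]⟩
  | succ m ih =>
    intro hm1
    have hm : m < v.length := by omega
    obtain ⟨d, hfold, hget⟩ := ih (by omega)
    -- take (m+1) of enumerate
    have htake : (PySem.List.enumerate v).take (m+1) =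
        (PySem.List.enumerate v).take m ++ [((m : Int), v[m])] := by
      rw [List.take_succ]
      congr 1
      rw [PySem.List.getElem?_enumerate]
      simp [hm]
    rw [htake, List.foldl_append, hfold]
    simp only [List.foldl_cons, List.foldl_nil]
    have hvm : v[m] = v.getD m 0 := (List.getD_eq_getElem v 0 hm).symm
    set key := v[m] - (m : Int) with hkey
    -- the updated dict
    set first := (if d.contains key then d else d.insert key v[m]) with hfirst
    have hKtake : (pvKeys v).take (m+1) = (pvKeys v).take m ++ [v.getD m 0 - (m : Int)] := by
      rw [List.take_succ]
      congr 1
      have hmK : m < (pvKeys v).length := by rw [pvKeys_length]; exact hm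
      rw [List.getElem?_eq_getElem hmK, pvKeys_getElem v hmK]
      rfl
    have hget' : ∀ t : Int, first.get? t =
        (((pvKeys v).take (m+1)).findIdx? (fun x => x == t)).map (fun i => v.getD i 0) := by
      intro t
      rw [hKtake, List.findIdx?_append]
      by_cases hc : d.contains key
      · have hfirst_eq : first = d := by rw [hfirst, if_pos hc]
        rw [hfirst_eq, hget t]
        rcases hp : ((pvKeys v).take m).findIdx? (fun x => x == t) with _ | i
        · -- not in prefix: t found in d? no
          simp only [Option.none_or]
          have hdt : d.get? t = none := by rw [hget t, hp]; rfl
          by_cases ht : (v.getD m 0 - (m : Int)) = t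
          · -- t = key: but key ∈ d, and d.get? key must be some by contains
            exfalso
            have : d.get? key ≠ none := by
              intro hnone
              rw [PySem.Dict.get?_eq_none_iff_contains] at hnone
              simp [hnone] at hc
            rw [hkey, hvm, ht] at this
            exact this hdt
          · have hb : ((v.getD m 0 - (m:Int)) == t) = false := by
              simp only [beq_eq_false_iff_ne]
              exact ht
            rw [List.getD_eq_getElem?_getD] at hb
            simp [List.findIdx?_cons, List.findIdx?_nil, hb]
        · simp
      · have hfirst_eq : first = d.insert key v[m] := by rw [hfirst, if_neg hc]
        rw [hfirst_eq]
        by_cases ht : t = key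
        · subst ht
          rw [PySem.Dict.get?_insert_self]
          have hp : ((pvKeys v).take m).findIdx? (fun x => x == key) = none := by
            rcases hp : ((pvKeys v).take m).findIdx? (fun x => x == key) with _ | i
            · rfl
            · exfalso
              have hdt := hget key
              rw [hp] at hdt
              have : d.contains key = true := by
                rw [PySem.Dict.contains_eq_isSome_get?, hdt]
                rfl
              simp [this] at hc
          rw [hp]
          simp only [Option.none_or]
          have hb : ((v.getD m 0 - (m : Int)) == key) = true := by
            rw [hkey, hvm]; simp
          simp only [List.findIdx?_cons, List.findIdx?_nil]
          rw [if_pos hb]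
          have hlen : (List.take m (pvKeys v)).length = m := by
            rw [List.length_take, pvKeys_length]; omega
          simp [hlen, hvm]
        · rw [PySem.Dict.get?_insert_of_ne _ _ ht, hget t]
          rcases hp : ((pvKeys v).take m).findIdx? (fun x => x == t) with _ | i
          · simp only [Option.none_or]
            have hb : ((v.getD m 0 - (m : Int)) == t) = false := by
              simp only [beq_eq_false_iff_ne]
              rw [hkey, hvm] at ht
              exact fun hh => ht hh.symm
            rw [List.getD_eq_getElem?_getD] at hb
            simp [List.findIdx?_cons, List.findIdx?_nil, hb]
          · simp
    refine ⟨first, ?_, by simpa [hKtake] using hget'⟩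
    -- now the best component
    have hlookup := hget' (key - flaw)
    have hkeyval : key = v.getD m 0 - (m : Int) := by rw [hkey, hvm]
    have hfi : ((pvKeys v).take (m+1)).findIdx? (fun x => x == v.getD m 0 - (m : Int) - flaw) =
        (pvKeys v).findIdx? (fun x => x == v.getD m 0 - (m : Int) - flaw) :=
      findIdx?_take_eq flaw v hv hf hm
    have hl2 : first.get? (key - flaw) =
        ((pvKeys v).findIdx? (fun x => x == v.getD m 0 - (m : Int) - flaw)).map
          (fun i => v.getD i 0) := by
      rw [hlookup, hkeyval, hfi]
    have hrange : (List.range (m+1)).filterMap (pvCand flaw v) =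
        (List.range m).filterMap (pvCand flaw v) ++ (pvCand flaw v m).toList := by
      rw [List.range_succ, List.filterMap_append, List.filterMap_cons]
      cases hcc : pvCand flaw v m <;> simp
    rw [hrange, hl2]
    rcases hg : (pvKeys v).findIdx? (fun x => x == v.getD m 0 - (m : Int) - flaw) with _ | i
    · have hcnone : pvCand flaw v m = none := by rw [pvCand, hg]; rfl
      simp [hcnone]
    · have hcsome : pvCand flaw v m = some (v.getD m 0 - v.getD i 0 + 1) := by
        rw [pvCand, hg]; rfl
      simp only [Option.map_some, hcsome, Option.toList_some, List.foldl_append,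
        List.foldl_cons, List.foldl_nil]
      rw [hvm]

lemma goA_eq (flaw : Int) (v : List Int) (hv : v.Pairwise (· < ·)) (hf : 0 ≤ flaw) :
    ∀ m left right lengths, (v.length - right) + (v.length + 1 - left) < m →
      left ≤ right → right ≤ v.length →
      (∀ l, l < left → ∀ j, right ≤ j → j < v.length →
        v.getD l 0 - l < v.getD j 0 - j - flaw) →
      goA flaw v m left right lengths =
        some (lengths ++ (List.range' right (v.length - right)).filterMap (pvCand flaw v)) := by
  intro m
  induction m with
  | zero => intro left right lengths h; omega
  | succ m ih =>
    intro left right lengths hmeas hlr hrn hinv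
    rw [goA]
    by_cases hr : right < v.length
    · rw [dif_pos hr]
      have hleft : left < v.length := by omega
      have hl : PySem.List.pyGet? v (left : Int) = some v[left] := by
        rw [PySem.List.pyGet?_natCast]
        exact List.getElem?_eq_getElem hleft
      split
      · rename_i heq
        rw [hl] at heq
        exact absurd heq (by simp)
      · rename_i vl heq
        rw [hl] at heq
        have hvl : vl = v[left] := by injection heq with h; exact h.symm
        subst hvl
        have hgl : v[left] = v.getD left 0 := (List.getD_eq_getElem v 0 hleft).symm
        have hgr : v[right] = v.getD right 0 := (List.getD_eq_getElem v 0 hr).symm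
        have hrange' : List.range' right (v.length - right) =
            right :: List.range' (right+1) (v.length - (right+1)) := by
          have : v.length - right = (v.length - (right+1)) + 1 := by omega
          rw [this, List.range'_succ]
        by_cases hgt : v[right] - v[left] - ((right : Int) - (left : Int)) > flaw
        · rw [if_pos hgt]
          have hne : left ≠ right := by
            intro h; subst h; rw [hgl] at hgt; omega
          rw [ih (left+1) right lengths (by omega) (by omega) hrn ?_]
          intro l hl' j hj hjn
          rcases Nat.lt_or_ge l left with hll | hll
          · exact hinv l hll j hj hjn
          · have : l = left := by omega
            subst this
            have h1 : v.getD l 0 - l < v.getD right 0 - right - flaw := by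
              rw [hgl, hgr] at hgt; omega
            have h2 := pvKeyMono v hv hj hjn
            omega
        · rw [if_neg hgt]
          by_cases heqd : v[right] - v[left] - ((right : Int) - (left : Int)) = flaw
          · rw [if_pos heqd]
            have hcand : pvCand flaw v right = some (v.getD right 0 - v.getD left 0 + 1) := by
              rw [pvCand]
              have hfind : (pvKeys v).findIdx?
                  (fun x => x == v.getD right 0 - right - flaw) = some left := by
                apply List.findIdx?_eq_some_iff_getElem.mpr
                refine ⟨by rw [pvKeys_length]; exact hleft, ?_, ?_⟩
                · rw [pvKeys_getElem]
                  simp only [beq_iff_eq]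
                  rw [hgl, hgr] at heqd; omega
                · intro l hl'
                  rw [pvKeys_getElem]
                  simp only [beq_iff_eq]
                  have := hinv l hl' right (le_refl _) hr
                  omega
              rw [hfind]; rfl
            rw [ih left (right+1) (lengths ++ [v[right] - v[left] + 1]) (by omega) (by omega)
              (by omega) ?_]
            · rw [hrange', List.filterMap_cons, hcand]
              rw [hgl, hgr]
              simp
            · intro l hl' j hj hjn
              exact hinv l hl' j (by omega) hjn
          · rw [if_neg heqd]
            have hcand : pvCand flaw v right = none := by
              rw [pvCand]
              have hfind : (pvKeys v).findIdx?
                  (fun x => x == v.getD right 0 - right - flaw) = none := by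
                apply List.findIdx?_eq_none_iff.mpr
                intro x hx
                obtain ⟨l, hlK, rfl⟩ := List.mem_iff_getElem.mp hx
                rw [pvKeys_getElem]
                simp only [beq_eq_false_iff_ne, ne_eq]
                have hlv : l < v.length := by rwa [pvKeys_length] at hlK
                rcases Nat.lt_or_ge l left with hll | hll
                · have := hinv l hll right (le_refl _) hr
                  omega
                · have := pvKeyMono v hv hll hlv
                  rw [hgl, hgr] at hgt heqd
                  omega
              rw [hfind]; rfl
            rw [ih left (right+1) lengths (by omega) (by omega) (by omega) ?_]
            · rw [hrange', List.filterMap_cons, hcand]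
            · intro l hl' j hj hjn
              exact hinv l hl' j (by omega) hjn
    · rw [dif_neg hr]
      have h0 : v.length - right = 0 := by omega
      rw [h0, List.range'_zero, List.filterMap_nil, List.append_nil]

lemma main_eq (flaw : Int) (s : String) (hf : 0 ≤ flaw) :
    findLongestVowelSubstring flaw s = findLongestVowelSubstring_alt flaw s := by
  have hv := pvVowelIdxs_pairwise s
  set v := pvVowelIdxs s with hvdef
  have hA : goA flaw v (2 * v.length + 2) 0 0 [] = some (pvLens flaw v) := by
    rw [goA_eq flaw v hv hf (2 * v.length + 2) 0 0 [] (by omega) (le_refl _) (by omega)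
      (by intro l hl; omega)]
    rw [pvLens, List.range_eq_range']
    simp
  obtain ⟨d, hfold, -⟩ := foldB_eq flaw v hv hf v.length (le_refl _)
  have htake : (PySem.List.enumerate v).take v.length = PySem.List.enumerate v := by
    rw [List.take_of_length_le]
    rw [PySem.List.length_enumerate]
  rw [htake] at hfold
  have hB : findLongestVowelSubstring_alt flaw s = (pvLens flaw v).foldl max 0 := by
    simp only [findLongestVowelSubstring_alt]
    rw [← hvdef, hfold, pvLens]
  rw [hB, findLongestVowelSubstring, ← hvdef, hA]
  show (if pvLens flaw v = [] then (0:Int)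
        else (PySem.List.max? (pvLens flaw v) fun x => x).getD 0) = (pvLens flaw v).foldl max 0
  rcases hL : pvLens flaw v with _ | ⟨x, t⟩
  · simp
  · have hx : 1 ≤ x := pvLens_pos flaw v hv hf x (by rw [hL]; exact List.mem_cons_self)
    rw [if_neg (by simp)]
    rw [PySem.List.max?_id_cons]
    simp only [Option.getD_some, List.foldl_cons]
    have : max 0 x = x := by omega
    rw [this]

lemma no_vowel_eq (flaw : Int) (s : String)
    (h : ∀ c ∈ s.toList, c ∉ (['a', 'e', 'i', 'o', 'u', 'A', 'E', 'I', 'O', 'U'] : List Char)) :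
    findLongestVowelSubstring flaw s = findLongestVowelSubstring_alt flaw s := by
  have hnil : pvVowelIdxs s = [] := by
    rw [pvVowelIdxs, List.filter_eq_nil_iff]
    intro i hi
    have h0 : 0 ≤ i := (PySem.List.mem_pyRange_one.mp hi).1
    rcases hg : PySem.Str.pyGet? s i with _ | c
    · simp
    · simp only
      have hc : c ∈ s.toList := by
        have := hg
        rw [PySem.Str.pyGet?_eq] at this
        rw [PySem.Chars.pyGet?_eq_listPyGet?] at this
        exact PySem.List.mem_of_pyGet?_eq_some _ this
      have := h c hc
      intro hcon
      rw [PySem.Set.contains_iff] at hcon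
      rw [pvVowels] at hcon
      rw [PySem.Set.mem_ofList] at hcon
      exact this hcon
  rw [findLongestVowelSubstring, findLongestVowelSubstring_alt, hnil]
  have hgo : goA flaw ([] : List Int) (2 * List.length ([] : List Int) + 2) 0 0 [] = some [] := rfl
  rw [hgo]
  simp

-- ===== VERDICT (by name: the statement is the Claim_ definition above) =====
theorem findLongestVowelSubstring_spec : Claim_equal_findLongestVowelSubstring := by
  intro flaw s _ hpre
  unfold Spec_findLongestVowelSubstring
  rcases hpre with hf | hnv
  · exact main_eq flaw s hf
  · exact no_vowel_eq flaw s hnv
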